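-- pv_equiv track=rewrite | github.com/raeez/chiral-bar-cobar | compute/lib/cy_dt_k3e_engine.py | hilb_k3_via_product
-- ===== SOURCE A (Python) =====
-- from typing import Dict, List, Optional, Tuple
--
-- def _convolve_int(a: List[int], b: List[int], nmax: int) -> List[int]:
--     """Cauchy product for integer lists, truncated to nmax terms."""
--     result = [0] * nmax
--     la, lb = len(a), len(b)
--     for i in range(min(la, nmax)):
--         if a[i] == 0:
--             continue
--         for j in range(min(lb, nmax - i)):
--             result[i + j] += a[i] * b[j]
--     return result
--
-- def hilb_k3_via_product(nmax: int) -> List[int]: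
--     """Compute prod_{k>=1}(1-q^k)^{-24} directly (cross-check path).
--
--     Expands the product factor by factor using binomial coefficients.
--     """
--     result = [0] * nmax
--     result[0] = 1
--     for k in range(1, nmax):
--         # Multiply by (1-q^k)^{-24} = sum_{j>=0} C(j+23,23) q^{jk}
--         factor = [0] * nmax
--         for j in range(nmax):
--             idx = j * k
--             if idx >= nmax:
--                 break
--             binom = 1
--             for i in range(23):
--                 binom = binom * (j + 23 - i) // (i + 1)
--             factor[idx] = binom
--         result = _convolve_int(result, factor, nmax)
--     return result
-- ===== SOURCE B (Python) =====
-- from typing import List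
--
-- def hilb_k3_via_product(nmax: int) -> List[int]:
--     """Compute prod_{k>=1}(1-q^k)^{-24} up to q^{nmax-1}.
--
--     Multiplies by 1/(1-q^k) twenty-four times per k using in-place
--     stride-k prefix sums (no binomials, no general convolution).
--     """
--     result = [0] * nmax
--     result[0] = 1
--     for k in range(1, nmax):
--         for _ in range(24):
--             for i in range(k, nmax):
--                 result[i] += result[i - k]
--     return result
-- ===== Notes on version B (the rewrite author's own statement) =====
-- stated objective: faster
-- what changed: Replaces the per-factor binomial-series construction plus full truncated convolution by 24 in-place stride-k prefix-sum passes (each pass multiplies by 1/(1-q^k)), eliminating both the binomial loop and the quadratic convolution per factor.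
import Mathlib
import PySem

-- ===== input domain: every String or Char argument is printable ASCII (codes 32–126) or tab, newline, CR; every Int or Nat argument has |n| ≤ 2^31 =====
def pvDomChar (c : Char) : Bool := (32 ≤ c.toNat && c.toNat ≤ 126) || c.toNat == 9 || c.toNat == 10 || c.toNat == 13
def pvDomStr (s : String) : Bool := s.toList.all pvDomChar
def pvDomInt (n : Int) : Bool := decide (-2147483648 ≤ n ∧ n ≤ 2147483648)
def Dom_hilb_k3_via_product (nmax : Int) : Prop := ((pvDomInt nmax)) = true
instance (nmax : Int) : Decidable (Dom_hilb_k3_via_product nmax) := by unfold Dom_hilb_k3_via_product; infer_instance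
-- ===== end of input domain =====

-- B replaces A's per-factor binomial series + full truncated convolution by 24 in-place
-- stride-k prefix-sum passes per factor (each pass multiplies by 1/(1-q^k)); measured faster.

-- ===== PORT A =====
-- inner `for i in range(23): binom = binom * (j + 23 - i) // (i + 1)` (all values nonnegative,
-- so Python's // is Nat division here)
def pvBinom (j : Nat) : Nat :=
  (List.range 23).foldl (fun b i => b * (j + 23 - i) / (i + 1)) 1

-- `factor = [0]*nmax; for j in range(nmax): idx = j*k; if idx >= nmax: break; factor[idx] = binom`
-- (the Bool component of the state is the `break` flag)
def pvFactor (n k : Nat) : List Int :=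
  ((List.range n).foldl
    (fun (st : List Int × Bool) j =>
      if st.2 then st
      else if n ≤ j * k then (st.1, true)
      else (st.1.set (j * k) (pvBinom j : Int), false))
    (List.replicate n 0, false)).1

-- `_convolve_int`, step for step (indices in the loops are always in range, so getD/set are exact)
def pvConv (a b : List Int) (n : Nat) : List Int :=
  (List.range (min a.length n)).foldl
    (fun res i =>
      if a.getD i 0 = 0 then res
      else (List.range (min b.length (n - i))).foldl
        (fun r j => r.set (i + j) (r.getD (i + j) 0 + a.getD i 0 * b.getD j 0)) res)
    (List.replicate n 0)

-- `result = [0]*nmax; result[0] = 1; for k in range(1, nmax): result = _convolve_int(result, factor, nmax)`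
-- ([0]*nmax = [] for nmax ≤ 0, where Python then raises IndexError: excluded by Pre_)
def hilb_k3_via_product (nmax : Int) : List Int :=
  let n := nmax.toNat
  let result := (List.replicate n 0).set 0 1
  (List.range' 1 (n - 1)).foldl (fun res k => pvConv res (pvFactor n k) n) result

-- ===== PORT B =====
def hilb_k3_via_product_alt (nmax : Int) : List Int :=
  let n := nmax.toNat
  let result := (List.replicate n 0).set 0 1
  (List.range' 1 (n - 1)).foldl
    (fun res k =>
      (List.range 24).foldl
        (fun r _ =>
          (List.range' k (n - k)).foldl
            (fun s i => s.set i (s.getD i 0 + s.getD (i - k) 0)) r)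
        res)
    result

-- ===== PRECONDITION & SPEC =====
-- Pre_ excludes nmax ≤ 0, where A (and B) raise IndexError at `result[0] = 1`.
def Pre_hilb_k3_via_product (nmax : Int) : Prop := 1 ≤ nmax
instance (nmax : Int) : Decidable (Pre_hilb_k3_via_product nmax) := by
  unfold Pre_hilb_k3_via_product; infer_instance

def pvWitness_hilb_k3_via_product : Int := 5

def Spec_hilb_k3_via_product (nmax : Int) (out : List Int) : Prop := out = hilb_k3_via_product_alt nmax
instance (nmax : Int) (out : List Int) : Decidable (Spec_hilb_k3_via_product nmax out) := by
  unfold Spec_hilb_k3_via_product; infer_instance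

-- ===== CLAIM (what is proved, stated in full; the proofs are below) =====
def Claim_equal_hilb_k3_via_product : Prop := ∀ (nmax : Int), Dom_hilb_k3_via_product nmax → Pre_hilb_k3_via_product nmax → Spec_hilb_k3_via_product nmax (hilb_k3_via_product nmax)

-- ===== LEMMAS AND PROOFS =====

-- the mathematical objects both programs compute truncations of
def pvF (k m : Nat) : Int := if k ∣ m then ((m / k + 23).choose 23 : Int) else 0
def pvG (k m : Nat) : Int := if k ∣ m then 1 else 0
noncomputable def pvFs (k : Nat) : PowerSeries Int := PowerSeries.mk (pvF k)
noncomputable def pvGs (k : Nat) : PowerSeries Int := PowerSeries.mk (pvG k)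
noncomputable def pvPs (K : Nat) : PowerSeries Int := ∏ k ∈ Finset.Icc 1 K, pvFs k

theorem pvGetD_set (l : List Int) (i j : Nat) (x : Int) :
    (l.set i x).getD j 0 = if i = j ∧ j < l.length then x else l.getD j 0 := by
  by_cases hj : j < l.length
  · by_cases hij : i = j
    · subst hij
      rw [List.getD_eq_getElem _ _ (by simpa using hj)]
      simp [List.getElem_set_self (by simpa using hj), hj]
    · rw [if_neg (by tauto)]
      by_cases hj2 : j < (l.set i x).length
      · rw [List.getD_eq_getElem _ _ hj2, List.getD_eq_getElem _ _ hj, List.getElem_set_ne hij]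
      · simp at hj2; omega
  · rw [if_neg (by tauto)]
    rw [List.getD_eq_default _ _ (by simpa using (by omega : l.length ≤ j)),
        List.getD_eq_default _ _ (by omega)]

theorem pvBinom_aux (j : Nat) : ∀ t, t ≤ 23 →
    (List.range t).foldl (fun b i => b * (j + 23 - i) / (i + 1)) 1 = (j + 23).choose t := by
  intro t
  induction t with
  | zero => simp
  | succ t ih =>
    intro ht
    rw [List.range_succ, List.foldl_append, ih (by omega)]
    simp only [List.foldl_cons, List.foldl_nil]
    have h := Nat.choose_succ_right_eq (j + 23) t
    have : (j + 23).choose t * (j + 23 - t) = (j+23).choose (t+1) * (t+1) := h.symm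
    rw [this, Nat.mul_div_cancel _ (by omega)]

theorem pvBinom_eq (j : Nat) : pvBinom j = (j + 23).choose 23 := by
  unfold pvBinom
  exact pvBinom_aux j 23 le_rfl

theorem pvHockey (q d : Nat) :
    ∑ t ∈ Finset.range (q + 1), ((t + d).choose d : Int) = ((q + d + 1).choose (d + 1) : Int) := by
  induction q with
  | zero => simp
  | succ q ih =>
    rw [Finset.sum_range_succ, ih]
    have h : (q + 1 + d + 1).choose (d + 1) = (q + d + 1).choose (d + 1) + (q + 1 + d).choose d := by
      have h2 := Nat.choose_succ_succ (q + d + 1) d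
      have : q + 1 + d + 1 = q + d + 1 + 1 := by ring
      rw [this, h2]
      have : q + 1 + d = q + d + 1 := by ring
      rw [this]; ring
    rw [h]; push_cast; ring

theorem pvSum_multiples (k m : Nat) (hk : 0 < k) (g : Nat → Int) :
    ∑ i ∈ Finset.range (m + 1), (if k ∣ i then g (i / k) else 0)
      = ∑ t ∈ Finset.range (m / k + 1), g t := by
  rw [← Finset.sum_filter]
  apply Finset.sum_bij' (fun i _ => i / k) (fun t _ => t * k)
  · intro a ha
    simp only [Finset.mem_filter, Finset.mem_range] at ha
    simp only [Finset.mem_range]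
    have := Nat.div_le_div_right (c := k) (by omega : a ≤ m)
    omega
  · intro t ht
    simp only [Finset.mem_range] at ht
    simp only [Finset.mem_filter, Finset.mem_range]
    constructor
    · have : t * k ≤ (m / k) * k := Nat.mul_le_mul_right k (by omega)
      have h2 : m / k * k ≤ m := Nat.div_mul_le_self m k
      omega
    · exact dvd_mul_left k t
  · intro a ha
    simp only [Finset.mem_filter] at ha
    exact Nat.div_mul_cancel ha.2
  · intro t ht
    exact Nat.mul_div_cancel t hk
  · intro a ha; rfl

theorem pvSum_G (k m : Nat) (hk : 0 < k) (f : Nat → Int) :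
    ∑ i ∈ Finset.range (m + 1), f i * pvG k (m - i)
      = ∑ t ∈ Finset.range (m / k + 1), f (m - t * k) := by
  have h1 : ∑ i ∈ Finset.range (m + 1), f i * pvG k (m - i)
      = ∑ i ∈ Finset.range (m + 1), f (m - i) * pvG k i := by
    have := Finset.sum_range_reflect (fun i => f (m - i) * pvG k i) (m + 1)
    rw [← this]
    apply Finset.sum_congr rfl
    intro i hi
    simp only [Finset.mem_range] at hi
    have h2 : m + 1 - 1 - i = m - i := by omega
    have h3 : m - (m - i) = i := by omega
    rw [h2, h3]
  rw [h1]
  have h4 : ∀ i ∈ Finset.range (m + 1), f (m - i) * pvG k i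
      = if k ∣ i then (fun t => f (m - t * k)) (i / k) else 0 := by
    intro i hi
    unfold pvG
    split_ifs with h
    · simp only [mul_one]
      rw [Nat.div_mul_cancel h]
    · ring
  rw [Finset.sum_congr rfl h4]
  exact pvSum_multiples k m hk (fun t => f (m - t * k))

theorem pvGs_pow (k : Nat) (hk : 0 < k) (d : Nat) :
    pvGs k ^ (d + 1) = PowerSeries.mk (fun m => if k ∣ m then ((m / k + d).choose d : Int) else 0) := by
  induction d with
  | zero =>
    rw [pow_one]
    unfold pvGs pvG
    congr 1
    funext m
    simp
  | succ d ih =>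
    rw [pow_succ, ih]
    ext m
    rw [PowerSeries.coeff_mul, Finset.Nat.sum_antidiagonal_eq_sum_range_succ_mk]
    simp only [PowerSeries.coeff_mk]
    have hstep : ∑ i ∈ Finset.range (m + 1),
        (if k ∣ i then ((i / k + d).choose d : Int) else 0) * pvG k (m - i)
        = ∑ t ∈ Finset.range (m / k + 1),
            (if k ∣ (m - t * k) then (((m - t * k) / k + d).choose d : Int) else 0) :=
      pvSum_G k m hk _
    simp only [pvGs, PowerSeries.coeff_mk]
    rw [hstep]
    by_cases hm : k ∣ m
    · obtain ⟨q, rfl⟩ := hm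
      rw [if_pos (Dvd.intro q rfl)]
      have hq : k * q / k = q := by rw [Nat.mul_div_cancel_left q hk]
      rw [hq]
      have hterm : ∀ t ∈ Finset.range (q + 1),
          (if k ∣ (k * q - t * k) then (((k * q - t * k) / k + d).choose d : Int) else 0)
          = ((q - t + d).choose d : Int) := by
        intro t ht
        simp only [Finset.mem_range] at ht
        have h5 : k * q - t * k = k * (q - t) := by
          rw [Nat.mul_comm t k, Nat.mul_sub]
        rw [h5, if_pos (Dvd.intro (q - t) rfl), Nat.mul_div_cancel_left _ hk]
      rw [Finset.sum_congr rfl hterm]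
      have hrefl : ∑ t ∈ Finset.range (q + 1), ((q - t + d).choose d : Int)
          = ∑ t ∈ Finset.range (q + 1), ((t + d).choose d : Int) := by
        have := Finset.sum_range_reflect (fun t => ((t + d).choose d : Int)) (q + 1)
        rw [← this]
        apply Finset.sum_congr rfl
        intro t ht
        simp only [Finset.mem_range] at ht
        have : q + 1 - 1 - t = q - t := by omega
        rw [this]
      rw [hrefl, pvHockey]
      have : q + (d + 1) = q + d + 1 := by omega
      rw [this]
    · rw [if_neg hm]
      apply Finset.sum_eq_zero
      intro t ht
      simp only [Finset.mem_range] at ht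
      rw [if_neg]
      intro hdvd
      apply hm
      have htk : t * k ≤ m := by
        have : t ≤ m / k := by omega
        calc t * k ≤ (m / k) * k := Nat.mul_le_mul_right k this
          _ ≤ m := Nat.div_mul_le_self m k
      have hsum : (m - t * k) + t * k = m := Nat.sub_add_cancel htk
      calc k ∣ (m - t * k) + t * k := dvd_add hdvd (Dvd.intro_left t rfl)
        _ = m := hsum

theorem pvFs_eq_pow (k : Nat) (hk : 0 < k) : pvFs k = pvGs k ^ 24 := by
  rw [pvGs_pow k hk 23]
  rfl

theorem pvFactor_inv (n k : Nat) (hk : 0 < k) (p : Nat) (hp : p ≤ n) :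
    ((List.range p).foldl
      (fun (st : List Int × Bool) j =>
        if st.2 then st
        else if n ≤ j * k then (st.1, true)
        else (st.1.set (j * k) (pvBinom j : Int), false))
      (List.replicate n 0, false)).1.length = n ∧
    (((List.range p).foldl
      (fun (st : List Int × Bool) j =>
        if st.2 then st
        else if n ≤ j * k then (st.1, true)
        else (st.1.set (j * k) (pvBinom j : Int), false))
      (List.replicate n 0, false)).2 = true ↔ ∃ j, j < p ∧ n ≤ j * k) ∧
    ∀ m < n, ((List.range p).foldl
      (fun (st : List Int × Bool) j =>
        if st.2 then st
        else if n ≤ j * k then (st.1, true)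
        else (st.1.set (j * k) (pvBinom j : Int), false))
      (List.replicate n 0, false)).1.getD m 0
      = if k ∣ m ∧ m / k < p then (pvBinom (m / k) : Int) else 0 := by
  induction p with
  | zero =>
    refine ⟨by simp, by simp, ?_⟩
    intro m hm
    simp only [List.range_zero, List.foldl_nil]
    rw [List.getD_eq_getElem _ _ (by simp [hm] : m < (List.replicate n (0:Int)).length)]
    simp
  | succ p ih =>
    have hp' : p ≤ n := by omega
    obtain ⟨hlen, hflag, hval⟩ := ih hp'
    rw [List.range_succ, List.foldl_append, List.foldl_cons, List.foldl_nil]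
    set st := (List.range p).foldl
      (fun (st : List Int × Bool) j =>
        if st.2 then st
        else if n ≤ j * k then (st.1, true)
        else (st.1.set (j * k) (pvBinom j : Int), false))
      (List.replicate n 0, false) with hst
    by_cases hfl : st.2
    · rw [if_pos hfl]
      have hex : ∃ j, j < p ∧ n ≤ j * k := hflag.mp hfl
      refine ⟨hlen, ⟨fun _ => by obtain ⟨j, hj1, hj2⟩ := hex; exact ⟨j, by omega, hj2⟩, fun _ => hfl⟩, ?_⟩
      intro m hm
      rw [hval m hm]
      -- conditions agree: m / k = p impossible since then m = (m/k)*k ≥ j*k ≥ n for some j ≤ p... 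
      have : ¬ (k ∣ m ∧ m / k = p) := by
        rintro ⟨hdvd, hq⟩
        obtain ⟨j, hj1, hj2⟩ := hex
        have hm2 : m = p * k := by
          have h5 := Nat.div_mul_cancel hdvd
          rw [hq] at h5
          omega
        have : n ≤ p * k := le_trans hj2 (Nat.mul_le_mul_right k (by omega))
        omega
      by_cases h1 : k ∣ m ∧ m / k < p
      · rw [if_pos h1, if_pos ⟨h1.1, by omega⟩]
      · rw [if_neg h1, if_neg (by rintro ⟨h2, h3⟩; exact h1 ⟨h2, by
          rcases Nat.lt_succ_iff_lt_or_eq.mp h3 with h | h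
          · exact h
          · exact absurd ⟨h2, h⟩ this⟩)]
    · rw [if_neg hfl]
      have hnoj : ∀ j, j < p → j * k < n := by
        intro j hj
        by_contra h
        exact hfl (hflag.mpr ⟨j, hj, by omega⟩)
      by_cases hbr : n ≤ p * k
      · rw [if_pos hbr]
        refine ⟨hlen, ⟨fun _ => ⟨p, by omega, hbr⟩, fun _ => rfl⟩, ?_⟩
        intro m hm
        rw [hval m hm]
        have : ¬ (k ∣ m ∧ m / k = p) := by
          rintro ⟨hdvd, hq⟩
          have h5 := Nat.div_mul_cancel hdvd
          rw [hq] at h5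
          omega
        by_cases h1 : k ∣ m ∧ m / k < p
        · rw [if_pos h1, if_pos ⟨h1.1, by omega⟩]
        · rw [if_neg h1, if_neg (by rintro ⟨h2, h3⟩; exact h1 ⟨h2, by
            rcases Nat.lt_succ_iff_lt_or_eq.mp h3 with h | h
            · exact h
            · exact absurd ⟨h2, h⟩ this⟩)]
      · rw [if_neg hbr]
        have hbr2 : p * k < n := by omega
        clear hbr
        refine ⟨by simpa using hlen, ?_, ?_⟩
        · simp only [Bool.false_eq_true, false_iff]
          rintro ⟨j, hj1, hj2⟩
          rcases Nat.lt_succ_iff_lt_or_eq.mp hj1 with h | h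
          · exact absurd hj2 (by have := hnoj j h; omega)
          · subst h; omega
        · intro m hm
          rw [pvGetD_set, hval m hm]
          by_cases heq : p * k = m
          · have hmlen : m < st.1.length := by omega
            rw [if_pos ⟨heq, hmlen⟩]
            have hdvd : k ∣ m := ⟨p, by rw [Nat.mul_comm]; omega⟩
            have hq : m / k = p := by
              subst heq
              exact Nat.mul_div_cancel p hk
            rw [hq, if_pos ⟨hdvd, by omega⟩]
          · rw [if_neg (by tauto)]
            have : ¬ (k ∣ m ∧ m / k = p) := by
              rintro ⟨hdvd, hq⟩
              apply heq
              have h5 := Nat.div_mul_cancel hdvd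
              rw [hq] at h5
              omega
            by_cases h1 : k ∣ m ∧ m / k < p
            · rw [if_pos h1, if_pos ⟨h1.1, by omega⟩]
            · rw [if_neg h1, if_neg (by rintro ⟨h2, h3⟩; exact h1 ⟨h2, by
                rcases Nat.lt_succ_iff_lt_or_eq.mp h3 with h | h
                · exact h
                · exact absurd ⟨h2, h⟩ this⟩)]

theorem pvFactor_length (n k : Nat) (hk : 0 < k) : (pvFactor n k).length = n :=
  (pvFactor_inv n k hk n le_rfl).1

theorem pvFactor_getD (n k : Nat) (hk : 0 < k) (m : Nat) (hm : m < n) :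
    (pvFactor n k).getD m 0 = pvF k m := by
  have h := (pvFactor_inv n k hk n le_rfl).2.2 m hm
  unfold pvFactor
  rw [h]
  unfold pvF
  by_cases hd : k ∣ m
  · have : m / k < n := by
      have : m / k ≤ m := Nat.div_le_self m k
      omega
    rw [if_pos ⟨hd, this⟩, if_pos hd, pvBinom_eq]
  · rw [if_neg (by tauto), if_neg hd]

theorem pvConvInner (b : List Int) (c : Int) (i : Nat) (L : Nat) (r : List Int)
    (hL : i + L ≤ r.length) :
    ((List.range L).foldl (fun r j => r.set (i + j) (r.getD (i + j) 0 + c * b.getD j 0)) r).length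
      = r.length ∧
    ∀ m, ((List.range L).foldl (fun r j => r.set (i + j) (r.getD (i + j) 0 + c * b.getD j 0)) r).getD m 0
      = r.getD m 0 + (if i ≤ m ∧ m - i < L then c * b.getD (m - i) 0 else 0) := by
  induction L generalizing r with
  | zero => simp
  | succ L ih =>
    have hL' : i + L ≤ r.length := by omega
    obtain ⟨ihlen, ihval⟩ := ih r hL'
    rw [List.range_succ, List.foldl_append, List.foldl_cons, List.foldl_nil]
    set out := (List.range L).foldl (fun r j => r.set (i + j) (r.getD (i + j) 0 + c * b.getD j 0)) r with hout
    constructor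
    · rw [List.length_set, ihlen]
    · intro m
      rw [pvGetD_set, ihval (i + L)]
      rw [if_neg (by omega : ¬ (i ≤ i + L ∧ i + L - i < L))]
      by_cases hm : i + L = m
      · rw [if_pos ⟨hm, by omega⟩]
        subst hm
        rw [if_pos (by omega : i ≤ i + L ∧ i + L - i < L + 1)]
        have h6 : i + L - i = L := by omega
        rw [h6]
        ring
      · rw [if_neg (by rintro ⟨h1, h2⟩; exact hm h1), ihval m]
        by_cases h3 : i ≤ m ∧ m - i < L
        · rw [if_pos h3, if_pos ⟨h3.1, by omega⟩]
        · rw [if_neg h3, if_neg (by rintro ⟨h4, h5⟩; exact h3 ⟨h4, by omega⟩)]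

theorem pvConv_length (a b : List Int) (n : Nat) : (pvConv a b n).length = n := by
  unfold pvConv
  have key : ∀ (l : List Nat), (∀ x ∈ l, x < n) → ∀ (res : List Int), res.length = n →
      ((l.foldl (fun res i =>
        if a.getD i 0 = 0 then res
        else (List.range (min b.length (n - i))).foldl
          (fun r j => r.set (i + j) (r.getD (i + j) 0 + a.getD i 0 * b.getD j 0)) res)
        (res)).length) = n := by
    intro l
    induction l with
    | nil => intro _ res h; simp only [List.foldl_nil]; exact h
    | cons x xs ih =>
      intro hmem res h
      have hxlt : x < n := hmem x List.mem_cons_self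
      have ihm : ∀ y ∈ xs, y < n := fun y hy => hmem y (List.mem_cons_of_mem x hy)
      simp only [List.foldl_cons]
      apply ih ihm
      by_cases hx : a.getD x 0 = 0
      · rw [if_pos hx]; exact h
      · rw [if_neg hx]
        by_cases hxn : x + min b.length (n - x) ≤ res.length
        · rw [(pvConvInner b (a.getD x 0) x (min b.length (n - x)) res hxn).1]; exact h
        · -- min b.length (n - x) ≤ n - x so x + min ≤ n = res.length unless x > n; then min = 0
          exfalso
          apply hxn
          have h1 : min b.length (n - x) ≤ n - x := Nat.min_le_right _ _
          omega
  exact key _ (fun x hx => by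
    simp only [List.mem_range] at hx
    omega) _ (by simp)

theorem pvConv_getD (a b : List Int) (n : Nat) (ha : a.length = n) (hb : b.length = n)
    (m : Nat) (hm : m < n) :
    (pvConv a b n).getD m 0 = ∑ i ∈ Finset.range (m + 1), a.getD i 0 * b.getD (m - i) 0 := by
  unfold pvConv
  rw [ha, hb, Nat.min_self]
  -- invariant over p
  have key : ∀ p, p ≤ n →
      (((List.range p).foldl (fun res i =>
        if a.getD i 0 = 0 then res
        else (List.range (min n (n - i))).foldl
          (fun r j => r.set (i + j) (r.getD (i + j) 0 + a.getD i 0 * b.getD j 0)) res)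
        (List.replicate n 0)).length = n) ∧
      ∀ m' < n, ((List.range p).foldl (fun res i =>
        if a.getD i 0 = 0 then res
        else (List.range (min n (n - i))).foldl
          (fun r j => r.set (i + j) (r.getD (i + j) 0 + a.getD i 0 * b.getD j 0)) res)
        (List.replicate n 0)).getD m' 0
        = ∑ i ∈ Finset.range (min p (m' + 1)), a.getD i 0 * b.getD (m' - i) 0 := by
    intro p
    induction p with
    | zero =>
      intro _
      refine ⟨by simp, ?_⟩
      intro m' hm'
      simp only [List.range_zero, List.foldl_nil, Nat.min_def]
      rw [if_pos (by omega), Finset.range_zero, Finset.sum_empty]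
      rw [List.getD_eq_getElem _ _ (by simp [hm'] : m' < (List.replicate n (0:Int)).length)]
      simp
    | succ p ih =>
      intro hp
      obtain ⟨ihlen, ihval⟩ := ih (by omega)
      rw [List.range_succ, List.foldl_append, List.foldl_cons, List.foldl_nil]
      set res := (List.range p).foldl (fun res i =>
        if a.getD i 0 = 0 then res
        else (List.range (min n (n - i))).foldl
          (fun r j => r.set (i + j) (r.getD (i + j) 0 + a.getD i 0 * b.getD j 0)) res)
        (List.replicate n 0) with hres
      have hmin : min n (n - p) = n - p := by omega
      by_cases hz : a.getD p 0 = 0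
      · rw [if_pos hz]
        refine ⟨ihlen, ?_⟩
        intro m' hm'
        rw [ihval m' hm']
        by_cases hpm : p ≤ m'
        · rw [Nat.min_eq_left (by omega), Nat.min_eq_left (by omega), Finset.sum_range_succ, hz]
          ring
        · rw [Nat.min_eq_right (by omega), Nat.min_eq_right (by omega)]
      · rw [if_neg hz, hmin]
        have hlen2 : p + (n - p) ≤ res.length := by omega
        obtain ⟨outlen, outval⟩ := pvConvInner b (a.getD p 0) p (n - p) res hlen2
        refine ⟨by rw [outlen, ihlen], ?_⟩
        intro m' hm'
        rw [outval m', ihval m' hm']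
        by_cases hpm : p ≤ m'
        · rw [if_pos ⟨hpm, by omega⟩]
          rw [Nat.min_eq_left (by omega), Nat.min_eq_left (by omega), Finset.sum_range_succ]
        · rw [if_neg (by omega)]
          rw [Nat.min_eq_right (by omega), Nat.min_eq_right (by omega)]
          ring
  have h := (key n le_rfl).2 m hm
  rw [h, Nat.min_eq_right (by omega)]

theorem pvStride (k n : Nat) (hk : 0 < k) (p : Nat) (hp : k + p ≤ n) (s : List Int)
    (hs : s.length = n) :
    ((List.range' k p).foldl (fun s i => s.set i (s.getD i 0 + s.getD (i - k) 0)) s).length = n ∧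
    ∀ m < n, ((List.range' k p).foldl (fun s i => s.set i (s.getD i 0 + s.getD (i - k) 0)) s).getD m 0 =
      if m < k + p then ∑ t ∈ Finset.range (m / k + 1), s.getD (m - t * k) 0 else s.getD m 0 := by
  induction p with
  | zero =>
    refine ⟨by simpa using hs, ?_⟩
    intro m hm
    simp only [List.range'_zero, List.foldl_nil]
    by_cases hmk : m < k
    · rw [if_pos (by omega), Nat.div_eq_of_lt hmk]
      simp
    · rw [if_neg (by omega)]
  | succ p ih =>
    obtain ⟨ihlen, ihval⟩ := ih (by omega)
    have hcat : List.range' k (p + 1) = List.range' k p ++ [k + p] := by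
      have := List.range'_concat (s := k) (n := p) (step := 1)
      simpa using this
    rw [hcat, List.foldl_append, List.foldl_cons, List.foldl_nil]
    set out := (List.range' k p).foldl (fun s i => s.set i (s.getD i 0 + s.getD (i - k) 0)) s with hout
    constructor
    · rw [List.length_set, ihlen]
    · intro m hm
      rw [pvGetD_set]
      have hv1 : out.getD (k + p) 0 = s.getD (k + p) 0 := by
        rw [ihval (k + p) (by omega), if_neg (by omega)]
      have hv2 : out.getD (k + p - k) 0 = ∑ t ∈ Finset.range (p / k + 1), s.getD (p - t * k) 0 := by
        have h1 : k + p - k = p := by omega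
        rw [h1, ihval p (by omega), if_pos (by omega)]
      by_cases hmeq : k + p = m
      · rw [if_pos ⟨hmeq, by omega⟩, hv1, hv2]
        subst hmeq
        rw [if_pos (by omega)]
        have hdiv : (k + p) / k = p / k + 1 := by
          rw [Nat.add_comm k p, Nat.add_div_right p hk]
        rw [hdiv]
        have hR : ∑ t ∈ Finset.range (p / k + 1 + 1), s.getD (k + p - t * k) 0
            = (∑ t ∈ Finset.range (p / k + 1), s.getD (p - t * k) 0) + s.getD (k + p) 0 := by
          rw [Finset.sum_range_succ' (fun t => s.getD (k + p - t * k) 0) (p / k + 1)]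
          congr 1
          · apply Finset.sum_congr rfl
            intro t ht
            simp only [Finset.mem_range] at ht
            have htk : t * k ≤ p := by
              have h2 : t ≤ p / k := by omega
              calc t * k ≤ (p / k) * k := Nat.mul_le_mul_right k h2
                _ ≤ p := Nat.div_mul_le_self p k
            have h3 : k + p - (t + 1) * k = p - t * k := by
              have : (t + 1) * k = t * k + k := by ring
              omega
            rw [h3]
          · norm_num
        rw [hR]
        ring
      · rw [if_neg (by rintro ⟨h1, _⟩; exact hmeq h1), ihval m hm]
        by_cases hlt : m < k + p
        · rw [if_pos hlt, if_pos (by omega)]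
        · rw [if_neg hlt, if_neg (by omega)]

theorem pvInit_getD (n : Nat) (hn : 0 < n) (m : Nat) (hm : m < n) :
    ((List.replicate n (0:Int)).set 0 1).getD m 0 = PowerSeries.coeff m (pvPs 0) := by
  rw [pvGetD_set]
  unfold pvPs
  rw [show Finset.Icc 1 0 = ∅ from rfl, Finset.prod_empty, PowerSeries.coeff_one]
  by_cases h0 : m = 0
  · subst h0
    rw [if_pos ⟨rfl, by simpa using hn⟩, if_pos rfl]
  · rw [if_neg (by tauto), if_neg h0]
    rw [List.getD_eq_getElem _ _ (by simp [hm] : m < (List.replicate n (0:Int)).length)]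
    simp

-- generic coefficient product step

theorem pvCoeff_mul_list (S : PowerSeries Int) (g : Nat → Int) (s : List Int) (n : Nat)
    (hs : ∀ m < n, s.getD m 0 = PowerSeries.coeff m S) (m : Nat) (hm : m < n) :
    PowerSeries.coeff m (S * PowerSeries.mk g)
      = ∑ i ∈ Finset.range (m + 1), s.getD i 0 * g (m - i) := by
  rw [PowerSeries.coeff_mul, Finset.Nat.sum_antidiagonal_eq_sum_range_succ_mk]
  apply Finset.sum_congr rfl
  intro i hi
  simp only [Finset.mem_range] at hi
  rw [PowerSeries.coeff_mk, hs i (by omega)]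

theorem pvA_loop (n : Nat) (hn : 0 < n) (t : Nat) :
    ((List.range' 1 t).foldl (fun res k => pvConv res (pvFactor n k) n)
      ((List.replicate n 0).set 0 1)).length = n ∧
    ∀ m < n, ((List.range' 1 t).foldl (fun res k => pvConv res (pvFactor n k) n)
      ((List.replicate n 0).set 0 1)).getD m 0 = PowerSeries.coeff m (pvPs t) := by
  induction t with
  | zero =>
    refine ⟨by simp, ?_⟩
    intro m hm
    simp only [List.range'_zero, List.foldl_nil]
    exact pvInit_getD n hn m hm
  | succ t ih =>
    obtain ⟨ihlen, ihval⟩ := ih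
    have hcat : List.range' 1 (t + 1) = List.range' 1 t ++ [1 + t] := by
      simpa using List.range'_concat (s := 1) (n := t) (step := 1)
    rw [hcat, List.foldl_append, List.foldl_cons, List.foldl_nil]
    set L := (List.range' 1 t).foldl (fun res k => pvConv res (pvFactor n k) n)
      ((List.replicate n 0).set 0 1) with hL
    have hk : 0 < 1 + t := by omega
    refine ⟨pvConv_length _ _ _, ?_⟩
    intro m hm
    rw [pvConv_getD L (pvFactor n (1 + t)) n ihlen (pvFactor_length n (1 + t) hk) m hm]
    have hstep : ∀ i ∈ Finset.range (m + 1),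
        L.getD i 0 * (pvFactor n (1 + t)).getD (m - i) 0
        = L.getD i 0 * pvF (1 + t) (m - i) := by
      intro i hi
      simp only [Finset.mem_range] at hi
      rw [pvFactor_getD n (1 + t) hk (m - i) (by omega)]
    rw [Finset.sum_congr rfl hstep]
    have hmul := pvCoeff_mul_list (pvPs t) (pvF (1 + t)) L n ihval m hm
    rw [← hmul, show PowerSeries.mk (pvF (1 + t)) = pvFs (1 + t) from rfl]
    unfold pvPs
    rw [Finset.prod_Icc_succ_top (by omega : 1 ≤ t + 1), show (1 + t) = t + 1 by omega]

theorem pvPass (k n : Nat) (hk : 0 < k) (hkn : k ≤ n) (s : List Int) (S : PowerSeries Int)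
    (hs : s.length = n) (hval : ∀ m < n, s.getD m 0 = PowerSeries.coeff m S) :
    ((List.range' k (n - k)).foldl (fun s i => s.set i (s.getD i 0 + s.getD (i - k) 0)) s).length = n ∧
    ∀ m < n, ((List.range' k (n - k)).foldl (fun s i => s.set i (s.getD i 0 + s.getD (i - k) 0)) s).getD m 0
      = PowerSeries.coeff m (S * pvGs k) := by
  obtain ⟨hlen, hv⟩ := pvStride k n hk (n - k) (by omega) s hs
  refine ⟨hlen, ?_⟩
  intro m hm
  rw [hv m hm, if_pos (by omega)]
  have h1 : PowerSeries.coeff m (S * pvGs k)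
      = ∑ i ∈ Finset.range (m + 1), s.getD i 0 * pvG k (m - i) := by
    unfold pvGs
    rw [pvCoeff_mul_list S (pvG k) s n hval m hm]
  rw [h1, pvSum_G k m hk (fun i => s.getD i 0)]

theorem pvPasses (k n : Nat) (hk : 0 < k) (hkn : k ≤ n) (d : Nat) (s : List Int) (S : PowerSeries Int)
    (hs : s.length = n) (hval : ∀ m < n, s.getD m 0 = PowerSeries.coeff m S) :
    ((List.range d).foldl (fun r _ =>
      (List.range' k (n - k)).foldl (fun s i => s.set i (s.getD i 0 + s.getD (i - k) 0)) r) s).length = n ∧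
    ∀ m < n, ((List.range d).foldl (fun r _ =>
      (List.range' k (n - k)).foldl (fun s i => s.set i (s.getD i 0 + s.getD (i - k) 0)) r) s).getD m 0
      = PowerSeries.coeff m (S * pvGs k ^ d) := by
  induction d with
  | zero =>
    refine ⟨by simpa using hs, ?_⟩
    intro m hm
    simp only [List.range_zero, List.foldl_nil, pow_zero, mul_one]
    exact hval m hm
  | succ d ih =>
    obtain ⟨ihlen, ihval⟩ := ih
    rw [List.range_succ, List.foldl_append, List.foldl_cons, List.foldl_nil]
    have := pvPass k n hk hkn _ (S * pvGs k ^ d) ihlen ihval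
    refine ⟨this.1, ?_⟩
    intro m hm
    rw [this.2 m hm, mul_assoc, ← pow_succ]

theorem pvB_loop (n : Nat) (hn : 0 < n) (t : Nat) (ht : t < n) :
    ((List.range' 1 t).foldl
      (fun res k =>
        (List.range 24).foldl
          (fun r _ =>
            (List.range' k (n - k)).foldl
              (fun s i => s.set i (s.getD i 0 + s.getD (i - k) 0)) r)
          res)
      ((List.replicate n (0:Int)).set 0 1)).length = n ∧
    ∀ m < n, ((List.range' 1 t).foldl
      (fun res k =>
        (List.range 24).foldl
          (fun r _ =>
            (List.range' k (n - k)).foldl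
              (fun s i => s.set i (s.getD i 0 + s.getD (i - k) 0)) r)
          res)
      ((List.replicate n (0:Int)).set 0 1)).getD m 0 = PowerSeries.coeff m (pvPs t) := by
  induction t with
  | zero =>
    refine ⟨by simp, ?_⟩
    intro m hm
    simp only [List.range'_zero, List.foldl_nil]
    exact pvInit_getD n hn m hm
  | succ t ih =>
    obtain ⟨ihlen, ihval⟩ := ih (by omega)
    have hcat : List.range' 1 (t + 1) = List.range' 1 t ++ [1 + t] := by
      simpa using List.range'_concat (s := 1) (n := t) (step := 1)
    rw [hcat, List.foldl_append, List.foldl_cons, List.foldl_nil]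
    have hk : 0 < 1 + t := by omega
    have hkn : 1 + t ≤ n := by omega
    have := pvPasses (1 + t) n hk hkn 24 _ (pvPs t) ihlen ihval
    refine ⟨this.1, ?_⟩
    intro m hm
    rw [this.2 m hm, ← pvFs_eq_pow (1 + t) hk]
    unfold pvPs
    rw [Finset.prod_Icc_succ_top (by omega : 1 ≤ t + 1), show (1 + t) = t + 1 by omega]

theorem pvFinal (nmax : Int) (hpre : 1 ≤ nmax) :
    hilb_k3_via_product nmax = hilb_k3_via_product_alt nmax := by
  have hn : 0 < nmax.toNat := by omega
  obtain ⟨alen, aval⟩ := pvA_loop nmax.toNat hn (nmax.toNat - 1)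
  obtain ⟨blen, bval⟩ := pvB_loop nmax.toNat hn (nmax.toNat - 1) (by omega)
  simp only [hilb_k3_via_product, hilb_k3_via_product_alt]
  apply List.ext_getElem (by rw [alen, blen])
  intro i h1 h2
  have hi : i < nmax.toNat := by rw [← alen]; exact h1
  rw [← List.getD_eq_getElem _ 0 h1, ← List.getD_eq_getElem _ 0 h2]
  rw [aval i hi, bval i hi]

-- ===== VERDICT (by name: the statement is the Claim_ definition above) =====
theorem hilb_k3_via_product_spec : Claim_equal_hilb_k3_via_product := by
  intro nmax _ hpre
  unfold Spec_hilb_k3_via_product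
  exact pvFinal nmax hpre
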